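-- pv_equiv track=rewrite | github.com/encryptogroup/LEAKER | leaker/attack/gjw.py | _extend_left
-- ===== SOURCE A (Python) =====
-- from typing import List, Iterable, Union, Any, Set, Tuple, FrozenSet
--
-- def _extend_left(big_si: Set[Tuple[int]], big_w: Set[int], b: int) -> Set:
--     big_s = set()
--     for s in big_si:
--         for w in big_w:
--             temp = {w + sum(s[:x]) for x in range(1, b)}
--             if temp <= big_w:
--                 big_s.add(tuple([w]) + s)
--     return big_s
-- ===== SOURCE B (Python) =====
-- def _extend_left(big_si, big_w, b):
--     if not big_w:
--         return set()
--     big_s = set()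
--     for s in big_si:
--         # prefix sums sum(s[:x]) for x in 1..b-1, one pass
--         prefixes = []
--         acc = 0
--         for x in range(1, b):
--             if x - 1 < len(s):
--                 acc += s[x - 1]
--             prefixes.append(acc)
--         # narrow the candidate w's by intersecting with shifted copies of big_w
--         valid = list(big_w)
--         for p in prefixes:
--             if not valid:
--                 break
--             shifted = {v - p for v in big_w}
--             valid = [w for w in valid if w in shifted]
--         for w in valid:
--             big_s.add((w,) + s)
--     return big_s
-- ===== Notes on version B (the rewrite author's own statement) =====
-- stated objective: faster
-- what changed: B inverts the loop structure: instead of testing, for every w, all b-1 sliced sums against big_w, it computes each sequence's prefix sums once and then narrows a candidate list of w's by intersecting it with shifted copies of big_w (one shifted set per prefix sum), adding all surviving w's at the end.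
import Mathlib
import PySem

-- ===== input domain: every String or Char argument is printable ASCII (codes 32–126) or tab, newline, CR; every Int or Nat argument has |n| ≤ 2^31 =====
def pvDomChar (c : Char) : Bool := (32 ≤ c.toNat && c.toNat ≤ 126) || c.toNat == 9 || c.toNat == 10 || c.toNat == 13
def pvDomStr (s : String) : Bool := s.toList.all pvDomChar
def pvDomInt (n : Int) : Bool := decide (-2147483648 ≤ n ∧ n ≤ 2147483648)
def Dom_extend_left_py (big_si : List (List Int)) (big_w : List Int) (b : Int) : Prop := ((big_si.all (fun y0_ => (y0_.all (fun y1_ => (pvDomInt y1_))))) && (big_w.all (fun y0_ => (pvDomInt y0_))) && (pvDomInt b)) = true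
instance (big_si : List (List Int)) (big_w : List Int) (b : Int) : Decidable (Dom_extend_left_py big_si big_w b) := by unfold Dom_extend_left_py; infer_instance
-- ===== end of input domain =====

-- B inverts the loop structure: per sequence it computes the prefix sums once and narrows a
-- candidate list of w's by intersecting it with shifted copies of big_w, instead of A's
-- per-(s,w) recomputation of sliced sums and subset test (objective: faster).

-- ===== PORT A =====
def extend_left_py (big_si : List (List Int)) (big_w : List Int) (b : Int) : List (List Int) :=
  big_si.foldl (fun big_s s =>
    big_w.foldl (fun big_s w =>
      let temp : PySem.Set Int :=
        PySem.Set.ofList ((PySem.List.pyRange 1 b 1).map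
          (fun x => w + (PySem.List.slice s none (some x)).sum))
      if PySem.Set.issubset temp big_w then PySem.Set.add big_s (w :: s) else big_s)
      big_s) []

-- ===== PORT B =====
def extend_left_py_alt (big_si : List (List Int)) (big_w : List Int) (b : Int) : List (List Int) :=
  if big_w.isEmpty then [] else
  big_si.foldl (fun big_s s =>
    -- prefix sums sum(s[:x]) for x in range(1, b), one pass
    let prefixes : List Int := ((PySem.List.pyRange 1 b 1).foldl
      (fun (p : List Int × Int) x =>
        let acc := if x - 1 < (s.length : Int) then p.2 + PySem.List.pyGetD s (x - 1) 0 else p.2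
        (p.1 ++ [acc], acc)) ([], 0)).1
    -- narrow the candidates by intersecting with shifted copies of big_w
    let valid : List Int := prefixes.foldl (fun valid p =>
      if valid.isEmpty then valid
      else
        let shifted : PySem.Set Int := PySem.Set.ofList (big_w.map (fun v => v - p))
        valid.filter (fun w => PySem.Set.contains shifted w)) big_w
    valid.foldl (fun big_s w => PySem.Set.add big_s (w :: s)) big_s) []

-- ===== PRECONDITION & SPEC =====
def Spec_extend_left_py (big_si : List (List Int)) (big_w : List Int) (b : Int) (out : List (List Int)) : Prop := out = extend_left_py_alt big_si big_w b
instance (big_si : List (List Int)) (big_w : List Int) (b : Int) (out : List (List Int)) : Decidable (Spec_extend_left_py big_si big_w b out) := by unfold Spec_extend_left_py; infer_instance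

-- ===== CLAIM (what is proved, stated in full; the proofs are below) =====
def Claim_equal_extend_left_py : Prop := ∀ (big_si : List (List Int)) (big_w : List Int) (b : Int), Dom_extend_left_py big_si big_w b → Spec_extend_left_py big_si big_w b (extend_left_py big_si big_w b)

-- ===== LEMMAS AND PROOFS =====

lemma pv_foldl_fixed {α β : Type} (l : List α) (init : β) :
    l.foldl (fun acc _ => acc) init = init := by
  induction l generalizing init with
  | nil => rfl
  | cons x t ih => exact ih init

-- one accumulator step of B's prefix-sum loop equals the next sum(s[:x])
lemma pv_take_sum_step (s : List Int) (a : Int) (ha : 1 ≤ a) :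
    (if a - 1 < (s.length : Int) then (s.take (a-1).toNat).sum + PySem.List.pyGetD s (a-1) 0
     else (s.take (a-1).toNat).sum) = (s.take a.toNat).sum := by
  have h0 : (0:Int) ≤ a - 1 := by omega
  rw [PySem.List.pyGetD_of_nonneg s 0 h0]
  have han : a.toNat = (a-1).toNat + 1 := by omega
  rw [han, List.take_add_one, List.sum_append, List.getD]
  by_cases h : a - 1 < (s.length : Int)
  · rw [if_pos h]
    congr 1
    cases s[(a-1).toNat]? <;> simp
  · rw [if_neg h]
    have hn2 : s[a.toNat - 1]? = none := List.getElem?_eq_none (by omega)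
    simp [hn2]

-- B's prefix-sum loop computes the list of sums sum(s[:x]) for x in range(a, b)
lemma pv_ps_fold (s : List Int) (b : Int) : ∀ (n : Nat) (a : Int), 1 ≤ a → (b - a).toNat = n →
    ∀ (l : List Int),
    ((PySem.List.pyRange a b 1).foldl
      (fun (p : List Int × Int) x =>
        let acc := if x - 1 < (s.length : Int) then p.2 + PySem.List.pyGetD s (x - 1) 0 else p.2
        (p.1 ++ [acc], acc)) (l, (s.take (a-1).toNat).sum)).1
    = l ++ (PySem.List.pyRange a b 1).map (fun x => (s.take x.toNat).sum) := by
  intro n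
  induction n with
  | zero =>
    intro a ha hn l
    rw [PySem.List.pyRange_one_eq_nil (by omega)]
    simp
  | succ m ih =>
    intro a ha hn l
    rw [PySem.List.pyRange_one_cons (by omega)]
    simp only [List.foldl_cons, List.map_cons]
    rw [pv_take_sum_step s a ha]
    have : a + 1 - 1 = a := by ring
    have h2 := ih (a+1) (by omega) (by omega) (l ++ [(s.take a.toNat).sum])
    rw [this] at h2
    rw [h2, List.append_assoc]
    rfl

-- membership in the shifted copy of big_w is membership of w + p in big_w
lemma pv_shift_mem (big_w : List Int) (p w : Int) :
    PySem.Set.contains (PySem.Set.ofList (big_w.map (fun v => v - p))) w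
    = PySem.Set.contains big_w (w + p) := by
  rw [Bool.eq_iff_iff, PySem.Set.contains_iff, PySem.Set.contains_iff, PySem.Set.mem_ofList,
    List.mem_map]
  constructor
  · rintro ⟨v, hv, rfl⟩; simpa using hv
  · intro h; exact ⟨w + p, h, by ring⟩

-- B's narrowing loop is the filter by "all prefix sums land in big_w"
lemma pv_narrow (big_w : List Int) (P : List Int) : ∀ (v : List Int),
    P.foldl (fun valid p =>
      if valid.isEmpty then valid
      else valid.filter (fun w =>
        PySem.Set.contains (PySem.Set.ofList (big_w.map (fun v => v - p))) w)) v
    = v.filter (fun w => P.all (fun p => PySem.Set.contains big_w (w + p))) := by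
  induction P with
  | nil => intro v; simp
  | cons p P ih =>
    intro v
    simp only [List.foldl_cons]
    have hstep : (if v.isEmpty then v
        else v.filter (fun w =>
          PySem.Set.contains (PySem.Set.ofList (big_w.map (fun v => v - p))) w))
        = v.filter (fun w => PySem.Set.contains big_w (w + p)) := by
      cases v with
      | nil => simp
      | cons a t =>
        rw [if_neg (by simp)]
        congr 1
        funext w
        exact pv_shift_mem big_w p w
    rw [hstep, ih, List.filter_filter]
    simp [Bool.and_comm]

-- A's subset test on the comprehension set equals the all-membership test on the prefix sums
lemma pv_cond_eq (big_w : List Int) (w : Int) (l : List Int) :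
    PySem.Set.issubset (PySem.Set.ofList (l.map (fun p => w + p))) big_w
    = l.all (fun p => PySem.Set.contains big_w (w + p)) := by
  rw [Bool.eq_iff_iff]
  simp only [PySem.Set.issubset, List.all_eq_true, PySem.Set.mem_ofList, List.mem_map,
    PySem.Set.contains_iff]
  constructor
  · intro h p hp; exact h _ ⟨p, hp, rfl⟩
  · rintro h x ⟨p, hp, rfl⟩; exact h p hp

-- ===== VERDICT (by name: the statement is the Claim_ definition above) =====
theorem extend_left_py_spec : Claim_equal_extend_left_py := by
  intro big_si big_w b _
  unfold Spec_extend_left_py extend_left_py extend_left_py_alt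
  by_cases hw : big_w = []
  · subst hw
    simp only [List.isEmpty_nil, if_true, List.foldl_nil]
    exact pv_foldl_fixed big_si []
  rw [if_neg (by simpa [List.isEmpty_iff] using hw)]
  congr 1
  funext big_s s
  have hps := pv_ps_fold s b (b - 1).toNat 1 le_rfl rfl []
  simp only [show (1:Int) - 1 = 0 from rfl, Int.toNat_zero, List.take_zero, List.sum_nil,
    List.nil_append] at hps
  simp only [hps, pv_narrow]
  rw [← PySem.List.foldl_if_eq_foldl_filter]
  congr 1
  funext bs w
  have hmap : (PySem.List.pyRange 1 b 1).map (fun x => w + (PySem.List.slice s none (some x)).sum)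
      = ((PySem.List.pyRange 1 b 1).map (fun x => (s.take x.toNat).sum)).map (fun p => w + p) := by
    rw [List.map_map]
    apply List.map_congr_left
    intro x hx
    have hx1 : 1 ≤ x := (PySem.List.mem_pyRange_one.mp hx).1
    rw [PySem.List.slice_to s (by omega)]
    rfl
  simp only [hmap, pv_cond_eq]
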